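-- pv_equiv track=rewrite | github.com/d-gurgurov/CLaS-Bench | CLaS-Bench/identification/vis_pca.py | get_family_positions
-- ===== SOURCE A (Python) =====
-- def get_family_positions(ordered_langs, lang_families):
--     """Get positions where family boundaries should be drawn"""
--     positions = []
--     current_pos = 0
--     current_family = None
--
--     for lang in ordered_langs:
--         lang_family = None
--         for family, family_langs in lang_families.items():
--             if lang in family_langs:
--                 lang_family = family
--                 break
--
--         if current_family is not None and lang_family != current_family:
--             positions.append(current_pos)
--
--         current_family = lang_family
--         current_pos += 1
--
--     return positions
-- ===== SOURCE B (Python) =====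
-- def get_family_positions(ordered_langs, lang_families):
--     """Get positions where family boundaries should be drawn"""
--     # reverse index: language -> its first-listed family
--     fam_of = {}
--     for family, family_langs in lang_families.items():
--         for l in family_langs:
--             fam_of.setdefault(l, family)
--     fams = [fam_of.get(lang) for lang in ordered_langs]
--     # run-length encode the family sequence
--     runs = []
--     cur = None
--     for f in fams:
--         if cur is not None and cur[0] == f:
--             cur = (f, cur[1] + 1)
--         else:
--             if cur is not None:
--                 runs.append(cur)
--             cur = (f, 1)
--     if cur is not None:
--         runs.append(cur)
--     # a boundary falls after each run except the last, unless that run's family is None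
--     positions = []
--     pos = 0
--     for f, n in runs[:-1]:
--         pos += n
--         if f is not None:
--             positions.append(pos)
--     return positions
-- ===== Notes on version B (the rewrite author's own statement) =====
-- stated objective: faster
-- what changed: B builds a reverse lang-to-family index once, run-length encodes the family sequence, and emits a boundary at the cumulative length after each non-last run whose family is not None, replacing A's single running current_family/current_pos loop with per-language scans over all families.
import Mathlib
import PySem

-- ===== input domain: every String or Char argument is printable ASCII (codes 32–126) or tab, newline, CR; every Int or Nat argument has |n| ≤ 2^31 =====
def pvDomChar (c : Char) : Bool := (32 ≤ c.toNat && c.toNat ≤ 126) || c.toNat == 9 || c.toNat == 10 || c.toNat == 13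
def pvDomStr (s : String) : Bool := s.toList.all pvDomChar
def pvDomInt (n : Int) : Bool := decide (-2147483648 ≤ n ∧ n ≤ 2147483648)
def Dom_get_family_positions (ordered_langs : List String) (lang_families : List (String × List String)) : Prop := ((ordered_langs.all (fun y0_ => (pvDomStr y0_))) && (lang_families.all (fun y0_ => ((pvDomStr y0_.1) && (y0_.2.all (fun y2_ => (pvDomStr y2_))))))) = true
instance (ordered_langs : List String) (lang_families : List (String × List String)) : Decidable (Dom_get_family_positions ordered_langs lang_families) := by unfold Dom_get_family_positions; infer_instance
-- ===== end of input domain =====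

-- B replaces A's running-accumulator loop (with a per-language scan over all families) by a
-- reverse lang→family index built once, a run-length encoding of the family sequence, and a
-- cumulative-length pass over the runs (objective: faster — the reverse index removes the inner scan).

-- ===== PORT A =====
-- inner for-loop over lang_families.items() with break: first family whose list contains lang
def pvFindFamA (lang : String) : List (String × List String) → Option String
  | [] => none
  | (family, family_langs) :: rest =>
      if lang ∈ family_langs then some family else pvFindFamA lang rest

def get_family_positions (ordered_langs : List String) (lang_families : List (String × List String)) : List Int :=
  let st := ordered_langs.foldl
    (fun (st : List Int × Int × Option String) lang =>
      let lang_family := pvFindFamA lang lang_families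
      let positions := if st.2.2 ≠ none ∧ lang_family ≠ st.2.2 then st.1 ++ [st.2.1] else st.1
      (positions, st.2.1 + 1, lang_family))
    ([], 0, none)
  st.1

-- ===== PORT B =====
-- fam_of = {}; for family, family_langs in lang_families.items(): for l in family_langs: fam_of.setdefault(l, family)
def pvFamDict (lang_families : List (String × List String)) : PySem.Dict String String :=
  lang_families.foldl (fun d p => p.2.foldl (fun d l => d.setdefault l p.1) d) PySem.Dict.empty

-- loop body of B's run-length-encoding pass: state (runs, cur); cur = None ↦ none
def pvRLEStep (st : List (Option String × Int) × Option (Option String × Int))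
    (f : Option String) : List (Option String × Int) × Option (Option String × Int) :=
  match st.2 with
  | some cur =>
      if cur.1 == f then (st.1, some (f, cur.2 + 1))
      else (st.1 ++ [cur], some (f, 1))
  | none => (st.1, some (f, 1))

-- loop body of B's positions pass: state (positions, pos); pos += n; if f is not None: append pos
def pvPosStep (st : List Int × Int) (r : Option String × Int) : List Int × Int :=
  let pos := st.2 + r.2
  (if r.1 ≠ none then st.1 ++ [pos] else st.1, pos)

def get_family_positions_alt (ordered_langs : List String) (lang_families : List (String × List String)) : List Int :=
  let fam_of := pvFamDict lang_families
  let fams := ordered_langs.map (fun lang => fam_of.get? lang)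
  let st := fams.foldl pvRLEStep ([], none)
  let runs := match st.2 with | some cur => st.1 ++ [cur] | none => st.1
  -- runs[:-1] is runs.dropLast (exact for the [:-1] slice of a list)
  (runs.dropLast.foldl pvPosStep ([], 0)).1

-- ===== PRECONDITION & SPEC =====
def Spec_get_family_positions (ordered_langs : List String) (lang_families : List (String × List String)) (out : List Int) : Prop := out = get_family_positions_alt ordered_langs lang_families
instance (ordered_langs : List String) (lang_families : List (String × List String)) (out : List Int) : Decidable (Spec_get_family_positions ordered_langs lang_families out) := by unfold Spec_get_family_positions; infer_instance

-- ===== CLAIM =====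
def Claim_equal_get_family_positions : Prop := ∀ (ordered_langs : List String) (lang_families : List (String × List String)), Dom_get_family_positions ordered_langs lang_families → Spec_get_family_positions ordered_langs lang_families (get_family_positions ordered_langs lang_families)

-- ===== LEMMAS AND PROOFS =====

-- the pairwise boundary list: boundary at pos when prev family ≠ none and cur family ≠ prev
def pvP : Option String → Int → List (Option String) → List Int
  | _, _, [] => []
  | prev, pos, f :: fs => (if prev ≠ none ∧ f ≠ prev then [pos] else []) ++ pvP f (pos + 1) fs

-- the inner setdefault loop over one family's language list, seen through get?
theorem pvInner_get (lang f : String) (ls : List String) (d : PySem.Dict String String) :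
    (ls.foldl (fun d l => d.setdefault l f) d).get? lang
      = ((d.get? lang).orElse (fun _ => if lang ∈ ls then some f else none)) := by
  induction ls generalizing d with
  | nil => cases h : d.get? lang <;> simp [Option.orElse, h]
  | cons l ls ih =>
    simp only [List.foldl_cons, ih]
    by_cases hl : l = lang
    · subst hl
      rw [PySem.Dict.get?_setdefault_self]
      cases d.get? l <;> simp [Option.orElse]
    · rw [PySem.Dict.get?_setdefault_of_ne d f (by exact fun h => hl h.symm)]
      by_cases hm : lang ∈ ls <;>
        cases h : d.get? lang <;>
          simp [Option.orElse, hm, Ne.symm hl]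

-- the reverse index agrees with A's first-match scan
theorem pvDict_eq_find (lang : String) (fl : List (String × List String)) :
    (pvFamDict fl).get? lang = pvFindFamA lang fl := by
  have key : ∀ (fl : List (String × List String)) (d : PySem.Dict String String),
      (fl.foldl (fun d p => p.2.foldl (fun d l => d.setdefault l p.1) d) d).get? lang
        = ((d.get? lang).orElse (fun _ => pvFindFamA lang fl)) := by
    intro fl
    induction fl with
    | nil => intro d; cases h : d.get? lang <;> simp [pvFindFamA, Option.orElse, h]
    | cons p rest ih =>
      intro d
      simp only [List.foldl_cons, ih, pvInner_get lang p.1 p.2 d]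
      cases h : d.get? lang <;>
        by_cases hm : lang ∈ p.2 <;>
          simp [Option.orElse, pvFindFamA, hm]
  unfold pvFamDict
  rw [key fl PySem.Dict.empty]
  rfl

-- A's loop invariant: the fold with state (acc, pos, cur) produces acc ++ pvP cur pos fams
theorem pvLoopA_eq (lf : List (String × List String)) :
    ∀ (langs : List String) (acc : List Int) (pos : Int) (cur : Option String),
    (langs.foldl
      (fun (st : List Int × Int × Option String) lang =>
        let lang_family := pvFindFamA lang lf
        let positions := if st.2.2 ≠ none ∧ lang_family ≠ st.2.2 then st.1 ++ [st.2.1] else st.1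
        (positions, st.2.1 + 1, lang_family))
      (acc, pos, cur)).1
      = acc ++ pvP cur pos (langs.map (fun l => pvFindFamA l lf)) := by
  intro langs
  induction langs with
  | nil => intro acc pos cur; simp [pvP]
  | cons l ls ih =>
    intro acc pos cur
    simp only [List.foldl_cons, List.map_cons, pvP]
    rw [ih]
    by_cases hc : cur ≠ none ∧ pvFindFamA l lf ≠ cur <;>
      simp [hc, List.append_assoc]

-- the recursive form of the run-length encoding, given an open run
def pvFinish : (Option String × Int) → List (Option String) → List (Option String × Int)
  | cur, [] => [cur]
  | cur, f :: fs => if cur.1 == f then pvFinish (f, cur.2 + 1) fs else cur :: pvFinish (f, 1) fs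

theorem pvFinish_ne_nil (cur : Option String × Int) (fs : List (Option String)) :
    pvFinish cur fs ≠ [] := by
  induction fs generalizing cur with
  | nil => simp [pvFinish]
  | cons f fs ih =>
    simp only [pvFinish]
    split
    · exact ih _
    · simp

-- B's RLE fold (with an open run) realises pvFinish
theorem pvRLE_eq (fs : List (Option String)) :
    ∀ (runs : List (Option String × Int)) (cur : Option String × Int),
    (match (fs.foldl pvRLEStep (runs, some cur)).2 with
     | some c => (fs.foldl pvRLEStep (runs, some cur)).1 ++ [c]
     | none => (fs.foldl pvRLEStep (runs, some cur)).1)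
      = runs ++ pvFinish cur fs := by
  induction fs with
  | nil => intro runs cur; simp [pvFinish]
  | cons f fs ih =>
    intro runs cur
    simp only [List.foldl_cons, pvFinish, pvRLEStep]
    by_cases h : cur.1 == f
    · simp only [h, if_true]
      exact ih runs (f, cur.2 + 1)
    · simp only [h, if_false, Bool.false_eq_true]
      rw [ih (runs ++ [cur]) (f, 1)]
      simp

-- the recursive form of the positions pass
def pvPos : Int → List (Option String × Int) → List Int
  | _, [] => []
  | pos, r :: rs => (if r.1 ≠ none then [pos + r.2] else []) ++ pvPos (pos + r.2) rs

theorem pvPosFold_eq (rs : List (Option String × Int)) :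
    ∀ (acc : List Int) (pos : Int),
    (rs.foldl pvPosStep (acc, pos)).1 = acc ++ pvPos pos rs := by
  induction rs with
  | nil => intro acc pos; simp [pvPos]
  | cons r rs ih =>
    intro acc pos
    simp only [List.foldl_cons, pvPos, pvPosStep]
    rw [ih]
    by_cases h : r.1 ≠ none <;> simp [h, List.append_assoc]

-- key lemma: the positions pass over the runs (minus the last) is the pairwise boundary list
theorem pvPos_finish (fs : List (Option String)) :
    ∀ (g : Option String) (n pos : Int),
    pvPos pos ((pvFinish (g, n) fs).dropLast) = pvP g (pos + n) fs := by
  induction fs with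
  | nil => intro g n pos; simp [pvFinish, pvPos, pvP]
  | cons f fs ih =>
    intro g n pos
    simp only [pvFinish, pvP]
    by_cases h : g == f
    · have hgf : g = f := by simpa using h
      simp only [h, if_true]
      rw [ih f (n + 1) pos]
      simp [hgf, add_assoc]
    · have hgf : f ≠ g := by
        intro he; exact h (by simp [he])
      simp only [h, if_false, Bool.false_eq_true]
      rw [List.dropLast_cons_of_ne_nil (pvFinish_ne_nil _ _)]
      simp only [pvPos]
      rw [ih f 1 (pos + n)]
      by_cases hg : g = none
      · simp [hg, add_assoc]
      · simp [hg, hgf, add_assoc]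

-- ===== VERDICT =====
theorem get_family_positions_spec : Claim_equal_get_family_positions := by
  unfold Claim_equal_get_family_positions Spec_get_family_positions
  intro ordered_langs lang_families _
  unfold get_family_positions get_family_positions_alt
  have hmap : ordered_langs.map (fun lang => (pvFamDict lang_families).get? lang)
      = ordered_langs.map (fun l => pvFindFamA l lang_families) :=
    List.map_congr_left (fun l _ => pvDict_eq_find l lang_families)
  rw [pvLoopA_eq lang_families ordered_langs [] 0 none]
  simp only [hmap, List.nil_append]
  generalize (ordered_langs.map (fun l => pvFindFamA l lang_families)) = fs
  cases fs with
  | nil => simp [pvP]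
  | cons f fs =>
    simp only [List.foldl_cons, pvRLEStep]
    rw [show pvP none (0 : Int) (f :: fs) = pvP f 1 fs by simp [pvP]]
    rw [pvRLE_eq fs [] (f, 1), List.nil_append, pvPosFold_eq, List.nil_append,
      pvPos_finish fs f 1 0, zero_add]
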